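-- pv_equiv track=rewrite | github.com/rbarile17/lp-dixit | src/geni/correlation_detection.py | evaluate_triangular_correlations
-- ===== SOURCE A (Python) =====
-- def evaluate_triangular_correlations(s, correlation_list, facts):
--     corrs = {}
--     for corr in correlation_list:
--         search=[(v[0],k,v[1]) for k,f in facts.items() for v in f if v and(v[0]==corr[0] or v[1]==corr[0])]
--         head_ents=[i[0] for i in search]
--         tail_ents=[i[2] for i in search]
--         if s in head_ents or s in tail_ents:
--             corrs[corr]=1
--         else:
--             corrs[corr]=0
--     return corrs
-- ===== SOURCE B (Python) =====
-- def evaluate_triangular_correlations(s, correlation_list, facts):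
--     # One pass over facts: collect every entity that co-occurs with s in some fact pair.
--     neighbors = set()
--     for f in facts.values():
--         for v0, v1 in f:
--             if s == v0 or s == v1:
--                 neighbors.add(v0)
--                 neighbors.add(v1)
--     return {corr: 1 if corr[0] in neighbors else 0 for corr in correlation_list}
-- ===== Notes on version B (the rewrite author's own statement) =====
-- stated objective: faster
-- what changed: B precomputes in one pass over facts the set of entities co-occurring with s, then answers each correlation with an O(1)-style set lookup, instead of rebuilding the full matching triple list for every correlation.
import Mathlib
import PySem

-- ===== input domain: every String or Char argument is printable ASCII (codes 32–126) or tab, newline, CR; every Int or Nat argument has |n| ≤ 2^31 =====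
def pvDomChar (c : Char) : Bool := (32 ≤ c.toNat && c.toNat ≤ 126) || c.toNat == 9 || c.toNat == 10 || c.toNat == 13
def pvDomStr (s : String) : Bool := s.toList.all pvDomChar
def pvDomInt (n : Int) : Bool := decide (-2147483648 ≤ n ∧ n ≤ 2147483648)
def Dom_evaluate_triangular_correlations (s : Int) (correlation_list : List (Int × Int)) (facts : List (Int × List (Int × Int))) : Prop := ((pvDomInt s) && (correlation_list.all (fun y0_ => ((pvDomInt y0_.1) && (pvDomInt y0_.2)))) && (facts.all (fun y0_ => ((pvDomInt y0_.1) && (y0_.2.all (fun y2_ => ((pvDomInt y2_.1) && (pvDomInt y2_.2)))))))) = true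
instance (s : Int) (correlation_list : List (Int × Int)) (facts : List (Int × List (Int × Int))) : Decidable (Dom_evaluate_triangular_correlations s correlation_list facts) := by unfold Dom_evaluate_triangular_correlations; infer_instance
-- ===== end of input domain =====

-- B precomputes the set of entities co-occurring with s in one pass over facts (A rescans all
-- facts for every correlation); faster by an asymptotic change, same return value.

-- ===== PORT A =====
-- 'if v and (...)': v is a 2-tuple of ints, always truthy, so only the disjunction remains.
def evaluate_triangular_correlations (s : Int) (correlation_list : List (Int × Int)) (facts : List (Int × List (Int × Int))) : List (Int × Int × Int) :=
  (correlation_list.foldl (fun corrs corr =>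
      let search := facts.flatMap (fun kf =>
        (kf.2.filter (fun v => v.1 == corr.1 || v.2 == corr.1)).map (fun v => (v.1, kf.1, v.2)))
      let head_ents := search.map (fun i => i.1)
      let tail_ents := search.map (fun i => i.2.2)
      corrs.insert corr (if head_ents.contains s || tail_ents.contains s then (1 : Int) else 0))
    PySem.Dict.empty).items.map (fun p => (p.1.1, p.1.2, p.2))

-- ===== PORT B =====
def evaluate_triangular_correlations_alt (s : Int) (correlation_list : List (Int × Int)) (facts : List (Int × List (Int × Int))) : List (Int × Int × Int) :=
  let neighbors : PySem.Set Int := facts.foldl (fun acc kf =>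
    kf.2.foldl (fun acc v =>
      if s == v.1 || s == v.2 then PySem.Set.add (PySem.Set.add acc v.1) v.2 else acc) acc)
    PySem.Set.empty
  (correlation_list.foldl (fun corrs corr =>
      corrs.insert corr (if PySem.Set.contains neighbors corr.1 then (1 : Int) else 0))
    PySem.Dict.empty).items.map (fun p => (p.1.1, p.1.2, p.2))

-- ===== PRECONDITION & SPEC =====
def Spec_evaluate_triangular_correlations (s : Int) (correlation_list : List (Int × Int)) (facts : List (Int × List (Int × Int))) (out : List (Int × Int × Int)) : Prop := out = evaluate_triangular_correlations_alt s correlation_list facts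
instance (s : Int) (correlation_list : List (Int × Int)) (facts : List (Int × List (Int × Int))) (out : List (Int × Int × Int)) : Decidable (Spec_evaluate_triangular_correlations s correlation_list facts out) := by unfold Spec_evaluate_triangular_correlations; infer_instance

-- ===== CLAIM (what is proved, stated in full; the proofs are below) =====
def Claim_equal_evaluate_triangular_correlations : Prop := ∀ (s : Int) (correlation_list : List (Int × Int)) (facts : List (Int × List (Int × Int))), Dom_evaluate_triangular_correlations s correlation_list facts → Spec_evaluate_triangular_correlations s correlation_list facts (evaluate_triangular_correlations s correlation_list facts)

-- ===== LEMMAS AND PROOFS =====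

-- membership in B's inner fold over one fact list
lemma mem_inner_fold (s x : Int) (f : List (Int × Int)) (acc : PySem.Set Int) :
    (x ∈ f.foldl (fun acc v =>
        if s == v.1 || s == v.2 then PySem.Set.add (PySem.Set.add acc v.1) v.2 else acc) acc)
      ↔ x ∈ acc ∨ ∃ v ∈ f, (s = v.1 ∨ s = v.2) ∧ (x = v.1 ∨ x = v.2) := by
  induction f generalizing acc with
  | nil => simp
  | cons v t ih =>
    simp only [List.foldl_cons, List.mem_cons]
    split_ifs with h
    · rw [ih]
      simp only [PySem.Set.mem_add]
      simp only [Bool.or_eq_true, beq_iff_eq] at h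
      constructor
      · rintro (((hx | hx) | hx) | ⟨w, hw, hws, hwx⟩)
        · exact Or.inl hx
        · exact Or.inr ⟨v, Or.inl rfl, h, Or.inl hx⟩
        · exact Or.inr ⟨v, Or.inl rfl, h, Or.inr hx⟩
        · exact Or.inr ⟨w, Or.inr hw, hws, hwx⟩
      · rintro (hx | ⟨w, (rfl | hw), hws, hwx⟩)
        · exact Or.inl (Or.inl (Or.inl hx))
        · rcases hwx with hx | hx
          · exact Or.inl (Or.inl (Or.inr hx))
          · exact Or.inl (Or.inr hx)
        · exact Or.inr ⟨w, hw, hws, hwx⟩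
    · rw [ih]
      simp only [Bool.or_eq_true, beq_iff_eq] at h
      push Not at h
      constructor
      · rintro (hx | ⟨w, hw, hws, hwx⟩)
        · exact Or.inl hx
        · exact Or.inr ⟨w, Or.inr hw, hws, hwx⟩
      · rintro (hx | ⟨w, (rfl | hw), hws, hwx⟩)
        · exact Or.inl hx
        · exact absurd hws (by tauto)
        · exact Or.inr ⟨w, hw, hws, hwx⟩

-- membership in B's neighbors set
lemma mem_neighbors (s x : Int) (facts : List (Int × List (Int × Int))) :
    (x ∈ facts.foldl (fun acc kf =>
        kf.2.foldl (fun acc v =>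
          if s == v.1 || s == v.2 then PySem.Set.add (PySem.Set.add acc v.1) v.2 else acc) acc)
        PySem.Set.empty)
      ↔ ∃ kf ∈ facts, ∃ v ∈ kf.2, (s = v.1 ∨ s = v.2) ∧ (x = v.1 ∨ x = v.2) := by
  have gen : ∀ (fs : List (Int × List (Int × Int))) (acc : PySem.Set Int),
      (x ∈ fs.foldl (fun acc kf =>
          kf.2.foldl (fun acc v =>
            if s == v.1 || s == v.2 then PySem.Set.add (PySem.Set.add acc v.1) v.2 else acc) acc) acc)
        ↔ x ∈ acc ∨ ∃ kf ∈ fs, ∃ v ∈ kf.2, (s = v.1 ∨ s = v.2) ∧ (x = v.1 ∨ x = v.2) := by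
    intro fs
    induction fs with
    | nil => simp
    | cons kf t ih =>
      intro acc
      simp only [List.foldl_cons, ih, mem_inner_fold, List.mem_cons]
      constructor
      · rintro ((hx | ⟨v, hv, hvs, hvx⟩) | ⟨w, hw, hws⟩)
        · exact Or.inl hx
        · exact Or.inr ⟨kf, Or.inl rfl, v, hv, hvs, hvx⟩
        · exact Or.inr ⟨w, Or.inr hw, hws⟩
      · rintro (hx | ⟨w, (rfl | hw), hws⟩)
        · exact Or.inl (Or.inl hx)
        · exact Or.inl (Or.inr hws)
        · exact Or.inr ⟨w, hw, hws⟩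
  rw [gen]
  simp [PySem.Set.empty]

-- the per-correlation flags of A and B agree
lemma flag_eq (s : Int) (facts : List (Int × List (Int × Int))) (corr : Int × Int) :
    (let search := facts.flatMap (fun kf =>
        (kf.2.filter (fun v => v.1 == corr.1 || v.2 == corr.1)).map (fun v => (v.1, kf.1, v.2)))
     ((search.map (fun i => i.1)).contains s || (search.map (fun i => i.2.2)).contains s))
    = PySem.Set.contains
        (facts.foldl (fun acc kf =>
          kf.2.foldl (fun acc v =>
            if s == v.1 || s == v.2 then PySem.Set.add (PySem.Set.add acc v.1) v.2 else acc) acc)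
          PySem.Set.empty) corr.1 := by
  rw [Bool.eq_iff_iff, PySem.Set.contains_iff, mem_neighbors]
  simp only [Bool.or_eq_true, List.contains_eq_mem, decide_eq_true_eq, List.mem_map,
    List.mem_flatMap, List.mem_filter, Bool.or_eq_true, beq_iff_eq]
  constructor
  · rintro (⟨i, ⟨kf, hkf, v, ⟨hv, hc⟩, rfl⟩, rfl⟩ | ⟨i, ⟨kf, hkf, v, ⟨hv, hc⟩, rfl⟩, rfl⟩)
    · exact ⟨kf, hkf, v, hv, by tauto⟩
    · exact ⟨kf, hkf, v, hv, by tauto⟩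
  · rintro ⟨kf, hkf, v, hv, hvs, hvc⟩
    rcases hvs with hs | hs
    · exact Or.inl ⟨(v.1, kf.1, v.2), ⟨kf, hkf, v, ⟨hv, by tauto⟩, rfl⟩, hs.symm⟩
    · exact Or.inr ⟨(v.1, kf.1, v.2), ⟨kf, hkf, v, ⟨hv, by tauto⟩, rfl⟩, hs.symm⟩

-- ===== VERDICT (by name: the statement is the Claim_ definition above) =====
theorem evaluate_triangular_correlations_spec : Claim_equal_evaluate_triangular_correlations := by
  intro s correlation_list facts _
  unfold Spec_evaluate_triangular_correlations
  unfold evaluate_triangular_correlations evaluate_triangular_correlations_alt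
  have hfun : (fun (corrs : PySem.Dict (Int × Int) Int) (corr : Int × Int) =>
      let search := facts.flatMap (fun kf =>
        (kf.2.filter (fun v => v.1 == corr.1 || v.2 == corr.1)).map (fun v => (v.1, kf.1, v.2)))
      let head_ents := search.map (fun i => i.1)
      let tail_ents := search.map (fun i => i.2.2)
      corrs.insert corr (if head_ents.contains s || tail_ents.contains s then (1 : Int) else 0))
      = (fun (corrs : PySem.Dict (Int × Int) Int) (corr : Int × Int) =>
      corrs.insert corr (if PySem.Set.contains
        (facts.foldl (fun acc kf =>
          kf.2.foldl (fun acc v =>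
            if s == v.1 || s == v.2 then PySem.Set.add (PySem.Set.add acc v.1) v.2 else acc) acc)
          PySem.Set.empty) corr.1 then (1 : Int) else 0)) := by
    funext corrs corr
    rw [← flag_eq s facts corr]
  rw [hfun]
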